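-- pv_equiv track=rewrite | github.com/TommyCpp/AhaMoment | leetcode/748-ShortestCompletingWord.py | hasAlpha
-- ===== SOURCE A (Python) =====
-- def hasAlpha(word, chars):
--     word = word.lower()
--     for char, times in chars.items():
--         index = word.find(char)
--         if index == -1:
--             return False
--         else:
--             res = 0
--             while index != -1:
--                 res += 1
--                 index = word.find(char, index + 1)
--             if res < times:
--                 return False
--     return True
-- ===== SOURCE B (Python) =====
-- def hasAlpha(word, chars):
--     w = word.lower()
--     counts = dict.fromkeys(chars, 0)
--     for i in range(len(w) + 1):
--         for c in counts:
--             if w.startswith(c, i):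
--                 counts[c] += 1
--     return all(counts[c] >= t for c, t in chars.items())
-- ===== Notes on version B (the rewrite author's own statement) =====
-- stated objective: alternative
-- what changed: Replaces A's key-major scanning (repeated word.find rescans with a manual while-counter and early returns per key) by a table built once: dict.fromkeys(chars, 0), one sweep over the text positions tallying every key's occurrences at once, then direct table lookups against the thresholds.
-- intended difference: On inputs where some required key has times <= 0 and does not occur in the lowercased word (and every other requirement is met), A returns False although a requirement of <= 0 occurrences is trivially satisfied; B returns True, the intended value. — e.g. on hasAlpha("b", [("a", 0)]): A returns false, B returns true
import Mathlib
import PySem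

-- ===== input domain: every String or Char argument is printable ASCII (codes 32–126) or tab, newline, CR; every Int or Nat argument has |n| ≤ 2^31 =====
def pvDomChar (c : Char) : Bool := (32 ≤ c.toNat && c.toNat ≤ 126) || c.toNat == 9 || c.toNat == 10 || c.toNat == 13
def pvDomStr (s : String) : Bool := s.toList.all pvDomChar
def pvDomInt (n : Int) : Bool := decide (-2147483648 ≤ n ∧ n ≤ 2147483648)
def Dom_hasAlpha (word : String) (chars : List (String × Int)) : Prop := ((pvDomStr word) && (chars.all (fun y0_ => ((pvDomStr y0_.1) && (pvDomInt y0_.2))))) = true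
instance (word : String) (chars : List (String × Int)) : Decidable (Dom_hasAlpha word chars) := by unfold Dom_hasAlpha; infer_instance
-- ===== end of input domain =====

-- B builds one occurrence-count table for all keys in a single sweep over the text positions
-- and then compares each requirement against the table (alternative decomposition; not claimed faster).

-- ===== PORT A =====
-- inner 'while index != -1: res += 1; index = word.find(char, index + 1)'
-- (the fuel only makes the loop total; it is never exhausted at the call site's fuel)
def pvACount (w sub : List Char) : Nat → Int → Int → Int
  | 0, _, res => res
  | fuel + 1, index, res =>
    if index = -1 then res
    else pvACount w sub fuel (PySem.Chars.findFrom w sub (index + 1) none) (res + 1)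

-- outer 'for char, times in chars.items(): …' with its early returns
def pvAOuter (w : List Char) : List (String × Int) → Bool
  | [] => true
  | (char, times) :: rest =>
    let index := PySem.Chars.find w char.toList
    if index = -1 then false
    else
      let res := pvACount w char.toList (w.length + 2) index 0
      if res < times then false else pvAOuter w rest

def hasAlpha (word : String) (chars : List (String × Int)) : Bool :=
  pvAOuter (PySem.Chars.lower word.toList) chars

-- ===== PORT B =====
-- 'for c in counts: if w.startswith(c, i): counts[c] += 1'  (one text position i)
def pvTally (w : List Char) (d : PySem.Dict String Int) (i : Nat) : PySem.Dict String Int :=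
  d.keys.foldl
    (fun d' c => if PySem.Chars.startswith (w.drop i) c.toList then d'.modify c 0 (· + 1) else d') d

def hasAlpha_alt (word : String) (chars : List (String × Int)) : Bool :=
  let w := PySem.Chars.lower word.toList
  -- counts = dict.fromkeys(chars, 0); for i in range(len(w)+1): … (the table built once)
  let counts := (List.range (w.length + 1)).foldl (pvTally w)
      (chars.foldl (fun d p => d.insert p.1 (0 : Int)) PySem.Dict.empty)
  -- all(counts[c] >= t for c, t in chars.items())
  chars.all (fun p => decide (p.2 ≤ counts.getD p.1 0))

-- ===== PRECONDITION & SPEC =====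
-- number of match positions of s in the lowercased word (positions 0..len; only "" matches at len)
def pvOccW (word s : String) : Int :=
  let w := PySem.Chars.lower word.toList
  ((List.range w.length.succ).countP (s.toList.isPrefixOf ∘ w.drop) : Int)

-- On inputs where some required key has times ≤ 0 and does not occur in the lowercased word
-- (and every other requirement is met), A returns False although a requirement of ≤ 0
-- occurrences is trivially satisfied; B returns True, the intended value.
def D_hasAlpha (word : String) (chars : List (String × Int)) : Prop :=
  (∃ p ∈ chars, pvOccW word p.1 = 0) ∧ ∀ p ∈ chars, p.2 ≤ pvOccW word p.1
instance (word : String) (chars : List (String × Int)) : Decidable (D_hasAlpha word chars) := by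
  unfold D_hasAlpha; infer_instance

def Spec_hasAlpha (word : String) (chars : List (String × Int)) (out : Bool) : Prop :=
  ¬ D_hasAlpha word chars → out = hasAlpha_alt word chars
instance (word : String) (chars : List (String × Int)) (out : Bool) : Decidable (Spec_hasAlpha word chars out) := by unfold Spec_hasAlpha; infer_instance

def pvDiffWitness_hasAlpha : String × (List (String × Int)) := ("b", [("a", 0)])
def pvDiffWitnessOut_hasAlpha : Bool × Bool := (false, true)

-- ===== CLAIM (what is proved, stated in full; the proofs are below) =====
def Claim_unchanged_hasAlpha : Prop := ∀ (word : String) (chars : List (String × Int)), Dom_hasAlpha word chars → Spec_hasAlpha word chars (hasAlpha word chars)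
def Claim_changed_hasAlpha : Prop := Dom_hasAlpha (pvDiffWitness_hasAlpha.1) (pvDiffWitness_hasAlpha.2) ∧ D_hasAlpha (pvDiffWitness_hasAlpha.1) (pvDiffWitness_hasAlpha.2) ∧ hasAlpha (pvDiffWitness_hasAlpha.1) (pvDiffWitness_hasAlpha.2) = pvDiffWitnessOut_hasAlpha.1 ∧ hasAlpha_alt (pvDiffWitness_hasAlpha.1) (pvDiffWitness_hasAlpha.2) = pvDiffWitnessOut_hasAlpha.2 ∧ pvDiffWitnessOut_hasAlpha.1 ≠ pvDiffWitnessOut_hasAlpha.2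
def Claim_exact_hasAlpha : Prop := ∀ (word : String) (chars : List (String × Int)), Dom_hasAlpha word chars → D_hasAlpha word chars → hasAlpha word chars ≠ hasAlpha_alt word chars

-- ===== LEMMAS AND PROOFS =====

-- number of match positions of sub in w (positions 0..len w; only [] matches at len w)
def pvOcc (w sub : List Char) : Int :=
  ((List.range (w.length + 1)).countP (fun i => PySem.Chars.startswith (w.drop i) sub) : Int)

theorem pvOccW_eq (word s : String) :
    pvOccW word s = pvOcc (PySem.Chars.lower word.toList) s.toList := by
  simp only [pvOccW, pvOcc, Nat.succ_eq_add_one]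
  congr 1


-- number of occurrence positions of sub in w among [k, w.length]
def pvCnt (w sub : List Char) (k : Nat) : Nat :=
  (List.range' k (w.length + 1 - k)).countP (fun i => sub.isPrefixOf (w.drop i))

theorem pvCnt_zero_of_no_infix (w sub : List Char) (k : Nat)
    (h : ¬ sub <:+: w.drop k) : pvCnt w sub k = 0 := by
  unfold pvCnt
  rw [List.countP_eq_zero]
  intro i hi
  simp only [List.mem_range'] at hi
  obtain ⟨j, hj, rfl⟩ := hi
  by_contra hp
  simp only [List.isPrefixOf_iff_prefix] at hp
  apply h
  have hd : w.drop (k + 1 * j) = (w.drop k).drop j := by rw [List.drop_drop]; ring_nf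
  rw [hd] at hp
  exact hp.isInfix.trans (List.drop_suffix j (w.drop k)).isInfix

theorem pvFindFrom_past (w sub : List Char) (k : Nat) (h : w.length < k) :
    PySem.Chars.findFrom w sub (k : Int) none = -1 := by
  simp only [PySem.Chars.findFrom]
  split_ifs with h1 h2 h3 <;> try rfl
  · omega
  all_goals (exfalso; omega)

theorem pvACount_neg_one (w sub : List Char) (f : Nat) (res : Int) (hf : 1 ≤ f) :
    pvACount w sub f (-1) res = res := by
  cases f with
  | zero => omega
  | succ f' => simp [pvACount]

-- splitting pvCnt at an occurrence k (k itself an occurrence, none in (k, j))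
theorem pvCnt_split (w sub : List Char) (k j : Nat) (hk : k < j) (hj : j ≤ w.length + 1)
    (hp : sub <+: w.drop k)
    (hmid : ∀ i, k < i → i < j → ¬ sub <+: w.drop i) :
    pvCnt w sub k = 1 + pvCnt w sub j := by
  unfold pvCnt
  have hsplit : List.range' k (w.length + 1 - k) =
      List.range' k (j - k) ++ List.range' j (w.length + 1 - j) := by
    have := @List.range'_append k (j - k) (w.length + 1 - j) 1
    rw [show k + 1 * (j - k) = j by omega] at this
    rw [this]
    congr 1
    omega
  rw [hsplit, List.countP_append]
  have h1 : (List.range' k (j - k)).countP (fun i => sub.isPrefixOf (w.drop i)) = 1 := by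
    have hcons : List.range' k (j - k) = k :: List.range' (k + 1) (j - k - 1) := by
      rw [show j - k = (j - k - 1) + 1 by omega]
      rw [List.range'_succ]; simp
    rw [hcons, List.countP_cons]
    have hz : (List.range' (k + 1) (j - k - 1)).countP (fun i => sub.isPrefixOf (w.drop i)) = 0 := by
      rw [List.countP_eq_zero]
      intro i hi
      simp only [List.mem_range'] at hi
      obtain ⟨m, hm, rfl⟩ := hi
      by_contra hq
      simp only [List.isPrefixOf_iff_prefix] at hq
      exact hmid _ (by omega) (by omega) hq
    simp [hz, List.isPrefixOf_iff_prefix, hp]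
  omega

theorem pvCnt_last (w sub : List Char) (hp : sub <+: w.drop w.length) :
    pvCnt w sub w.length = 1 := by
  unfold pvCnt
  rw [show w.length + 1 - w.length = 1 by omega]
  have hs : sub = [] := by simpa using hp
  subst hs
  simp [List.range']

-- A's inner while-loop, started at an occurrence idx with enough fuel,
-- adds exactly the number of occurrence positions ≥ idx
theorem pvACount_aux (w sub : List Char) :
    ∀ m idx, idx ≤ w.length → w.length - idx < m → sub <+: w.drop idx →
    ∀ fuel, w.length + 2 - idx ≤ fuel → ∀ res,
      pvACount w sub fuel (idx : Int) res = res + (pvCnt w sub idx : Int) := by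
  intro m
  induction m with
  | zero => intro idx _ h; omega
  | succ m ih =>
    intro idx hidx hm hp fuel hfuel res
    obtain ⟨f, rfl⟩ : ∃ f, fuel = f + 1 := ⟨fuel - 1, by omega⟩
    rw [pvACount]
    rw [if_neg (by omega)]
    by_cases hend : idx = w.length
    · subst hend
      rw [show (w.length : Int) + 1 = ((w.length + 1 : Nat) : Int) by push_cast; ring]
      rw [pvFindFrom_past w sub _ (by omega)]
      rw [pvACount_neg_one w sub f (res + 1) (by omega)]
      rw [pvCnt_last w sub hp]
      ring
    · have hlt : idx < w.length := by omega
      rw [show (idx : Int) + 1 = ((idx + 1 : Nat) : Int) by push_cast; ring]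
      rw [PySem.Chars.findFrom_natCast w sub (idx + 1) (by omega)]
      set r := PySem.Chars.find (List.drop (idx + 1) w) sub with hr
      by_cases hneg : r = -1
      · rw [if_pos hneg]
        rw [pvACount_neg_one w sub f (res + 1) (by omega)]
        have hnone : ¬ sub <:+: w.drop (idx + 1) := by
          rw [← PySem.Chars.find_eq_neg_one_iff]; exact hneg
        have : pvCnt w sub idx = 1 + pvCnt w sub (idx + 1) := by
          apply pvCnt_split w sub idx (idx + 1) (by omega) (by omega) hp
          intro i h1 h2; omega
        rw [this, pvCnt_zero_of_no_infix w sub (idx + 1) hnone]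
        push_cast; ring
      · rw [if_neg hneg]
        have hr0 : 0 ≤ r := by
          rw [hr, PySem.Chars.find_nonneg_iff, ← PySem.Chars.find_ne_neg_one_iff, ← hr]
          exact hneg
        obtain ⟨hpr, hmin⟩ := PySem.Chars.find_spec (s := List.drop (idx + 1) w) (sub := sub) hr0
        have hrlen : r ≤ (List.drop (idx + 1) w).length := PySem.Chars.find_le_length _ _
        set j := idx + 1 + r.toNat with hj
        have hcast : (idx + 1 : Nat) + r = (j : Int) := by rw [hj]; push_cast; omega
        rw [hcast]
        have hjlen : j ≤ w.length := by
          rw [hj]; have := hrlen; simp [List.length_drop] at this; omega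
        have hpj : sub <+: w.drop j := by
          rw [List.drop_drop] at hpr
          have : idx + 1 + r.toNat = j := rfl
          rwa [this] at hpr
        rw [ih j hjlen (by omega) hpj f (by omega) (res + 1)]
        have : pvCnt w sub idx = 1 + pvCnt w sub j := by
          apply pvCnt_split w sub idx j (by omega) (by omega) hp
          intro i h1 h2 hpi
          have hi' : sub <+: (List.drop (idx + 1) w).drop (i - (idx + 1)) := by
            rw [List.drop_drop, show idx + 1 + (i - (idx + 1)) = i by omega]
            exact hpi
          exact hmin (i - (idx + 1)) (by omega) hi'
        rw [this]
        push_cast; ring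

theorem pvOcc_eq_cnt (w sub : List Char) : pvOcc w sub = (pvCnt w sub 0 : Int) := by
  unfold pvOcc pvCnt
  rw [List.range_eq_range']
  simp [PySem.Chars.startswith]

-- per-key agreement: when find succeeds, A's counted res equals pvCnt 0 and is ≥ 1
theorem pvKey (w sub : List Char) (hne : PySem.Chars.find w sub ≠ -1) :
    pvACount w sub (w.length + 2) (PySem.Chars.find w sub) 0 = (pvCnt w sub 0 : Int)
    ∧ 1 ≤ (pvCnt w sub 0 : Int) := by
  set idx := PySem.Chars.find w sub with hidx
  have h0 : 0 ≤ idx := by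
    rw [hidx, PySem.Chars.find_nonneg_iff, ← PySem.Chars.find_ne_neg_one_iff]; exact hne
  obtain ⟨hpr, hmin⟩ := PySem.Chars.find_spec (s := w) (sub := sub) h0
  rw [← hidx] at hpr hmin
  have hlen : idx ≤ (w.length : Int) := PySem.Chars.find_le_length w sub
  have hle : idx.toNat ≤ w.length := by omega
  have hcast : ((idx.toNat : Nat) : Int) = idx := by omega
  have hA := pvACount_aux w sub (w.length - idx.toNat + 1) idx.toNat hle (by omega) hpr
      (w.length + 2) (by omega) 0
  rw [hcast] at hA
  have hsame : pvCnt w sub 0 = pvCnt w sub idx.toNat := by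
    by_cases hz : idx.toNat = 0
    · rw [hz]
    · unfold pvCnt
      have hsplit : List.range' 0 (w.length + 1) =
          List.range' 0 idx.toNat ++ List.range' idx.toNat (w.length + 1 - idx.toNat) := by
        have := @List.range'_append 0 idx.toNat (w.length + 1 - idx.toNat) 1
        rw [show 0 + 1 * idx.toNat = idx.toNat by omega] at this
        rw [this]; congr 1; omega
      rw [show w.length + 1 - 0 = w.length + 1 by omega, hsplit, List.countP_append]
      have : (List.range' 0 idx.toNat).countP (fun i => sub.isPrefixOf (w.drop i)) = 0 := by
        rw [List.countP_eq_zero]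
        intro i hi
        simp only [List.mem_range'] at hi
        obtain ⟨m, hm, rfl⟩ := hi
        by_contra hq
        simp only [List.isPrefixOf_iff_prefix] at hq
        exact hmin _ (by omega) hq
      omega
  have hge : 1 ≤ pvCnt w sub idx.toNat := by
    unfold pvCnt
    have hcons : List.range' idx.toNat (w.length + 1 - idx.toNat) =
        idx.toNat :: List.range' (idx.toNat + 1) (w.length - idx.toNat) := by
      rw [show w.length + 1 - idx.toNat = (w.length - idx.toNat) + 1 by omega]
      rw [List.range'_succ]
    rw [hcons, List.countP_cons]
    simp only [List.isPrefixOf_iff_prefix]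
    rw [if_pos hpr]
    omega
  constructor
  · rw [hA, hsame]; ring
  · rw [hsame]; omega

-- A as an 'all' over the occurrence counts (with A's accidental 'at least once' clamp)
theorem pvOuter_eq (w : List Char) : ∀ chars : List (String × Int),
    pvAOuter w chars = chars.all (fun p => decide (max p.2 1 ≤ pvOcc w p.1.toList)) := by
  intro chars
  induction chars with
  | nil => simp [pvAOuter]
  | cons hd tl ih =>
    obtain ⟨char, times⟩ := hd
    simp only [pvAOuter, List.all_cons]
    by_cases hne : PySem.Chars.find w char.toList = -1
    · rw [if_pos hne]
      have hz : pvCnt w char.toList 0 = 0 := by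
        apply pvCnt_zero_of_no_infix
        rw [List.drop_zero, ← PySem.Chars.find_eq_neg_one_iff]
        exact hne
      have hb : pvOcc w char.toList = 0 := by rw [pvOcc_eq_cnt, hz]; rfl
      rw [hb]
      have : ¬ (max times 1 ≤ (0 : Int)) := by omega
      simp [this]
    · rw [if_neg hne]
      obtain ⟨hA, hge⟩ := pvKey w char.toList hne
      rw [hA, pvOcc_eq_cnt]
      by_cases hlt : (pvCnt w char.toList 0 : Int) < times
      · rw [if_pos hlt]
        have : ¬ (max times 1 ≤ (pvCnt w char.toList 0 : Int)) := by omega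
        simp [this]
      · rw [if_neg hlt]
        have : max times 1 ≤ (pvCnt w char.toList 0 : Int) := by omega
        simp [this, ih]

-- ----- B side -----

-- one tally pass leaves the key set unchanged
theorem pvTally_keys (w : List Char) (i : Nat) :
    ∀ (ks : List String) (d : PySem.Dict String Int), (∀ c ∈ ks, c ∈ d.keys) →
    (ks.foldl
      (fun d' c => if PySem.Chars.startswith (w.drop i) c.toList then d'.modify c 0 (· + 1) else d') d).keys
      = d.keys := by
  intro ks
  induction ks with
  | nil => intro d _; rfl
  | cons c ks ih =>
    intro d hmem
    simp only [List.foldl_cons]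
    by_cases hq : PySem.Chars.startswith (w.drop i) c.toList
    · rw [if_pos hq]
      have hk : (d.modify c 0 (· + 1)).keys = d.keys := by
        rw [PySem.Dict.keys_modify]
        have hct : d.contains c = true := by
          rw [PySem.Dict.contains_iff_mem_keys]; exact hmem c (by simp)
        exact PySem.Dict.keys_insert_of_contains d _ hct
      rw [ih (d.modify c 0 (· + 1)) (by rw [hk]; intro x hx; exact hmem x (by simp [hx]))]
      exact hk
    · rw [if_neg hq]
      exact ih d (fun x hx => hmem x (by simp [hx]))

-- one tally pass adds 1 per copy of a matching key
theorem pvTally_getD (w : List Char) (i : Nat) :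
    ∀ (ks : List String) (d : PySem.Dict String Int) (x : String),
    (ks.foldl
      (fun d' c => if PySem.Chars.startswith (w.drop i) c.toList then d'.modify c 0 (· + 1) else d') d).getD x 0
      = d.getD x 0 + (if PySem.Chars.startswith (w.drop i) x.toList then (ks.count x : Int) else 0) := by
  intro ks
  induction ks with
  | nil => intro d x; simp
  | cons c ks ih =>
    intro d x
    simp only [List.foldl_cons]
    rw [List.count_cons]
    by_cases hcx : c = x
    · subst hcx
      by_cases hq : PySem.Chars.startswith (w.drop i) c.toList
      · rw [if_pos hq, ih, PySem.Dict.getD_modify, if_pos rfl, if_pos hq, if_pos hq]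
        simp only [BEq.rfl, if_true]
        push_cast
        ring
      · rw [if_neg hq, ih, if_neg hq, if_neg hq]
    · by_cases hq : PySem.Chars.startswith (w.drop i) c.toList
      · rw [if_pos hq, ih, PySem.Dict.getD_modify, if_neg (Ne.symm hcx)]
        have : (c == x) = false := by simp [hcx]
        simp [this]
      · rw [if_neg hq, ih]
        have : (c == x) = false := by simp [hcx]
        simp [this]

-- the whole sweep: keys preserved, and each key holds its running occurrence count
theorem pvSweep (w : List Char) (d0 : PySem.Dict String Int) (hnd : d0.keys.Nodup) :
    ∀ m : Nat,
      (((List.range m).foldl (pvTally w) d0).keys = d0.keys) ∧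
      (∀ x ∈ d0.keys, ((List.range m).foldl (pvTally w) d0).getD x 0 =
        d0.getD x 0 + ((List.range m).countP (fun i => PySem.Chars.startswith (w.drop i) x.toList) : Int)) := by
  intro m
  induction m with
  | zero => simp
  | succ m ih =>
    obtain ⟨ihk, ihg⟩ := ih
    rw [List.range_succ]
    set X := (List.range m).foldl (pvTally w) d0 with hX
    have hk1 : (pvTally w X m).keys = X.keys := by
      unfold pvTally
      exact pvTally_keys w m _ _ (fun c hc => hc)
    constructor
    · rw [List.foldl_append, List.foldl_cons, List.foldl_nil, hk1, ihk]
    · intro x hx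
      rw [List.foldl_append, List.foldl_cons, List.foldl_nil]
      have hg1 : (pvTally w X m).getD x 0 = X.getD x 0 +
          (if PySem.Chars.startswith (w.drop m) x.toList then (X.keys.count x : Int) else 0) := by
        unfold pvTally
        exact pvTally_getD w m _ _ x
      rw [hg1, ihg x hx, List.countP_append]
      have hcount : X.keys.count x = 1 := by
        rw [ihk]
        exact List.count_eq_one_of_mem hnd hx
      rw [hcount]
      by_cases hq : PySem.Chars.startswith (w.drop m) x.toList
      · simp [hq]
        omega
      · simp [hq]

-- dict.fromkeys(chars, 0): every lookup is 0
theorem pvFromKeys_getD :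
    ∀ (l : List (String × Int)) (d : PySem.Dict String Int), (∀ x, d.getD x (0 : Int) = 0) →
    ∀ x, (l.foldl (fun d p => d.insert p.1 (0 : Int)) d).getD x 0 = 0 := by
  intro l
  induction l with
  | nil => intro d h x; exact h x
  | cons p l ih =>
    intro d h x
    simp only [List.foldl_cons]
    apply ih
    intro y
    rw [PySem.Dict.getD_insert]
    split_ifs with hy
    · rfl
    · exact h y

theorem pv_all_congr_mem {α : Type} (l : List α) (f g : α → Bool)
    (h : ∀ x ∈ l, f x = g x) : l.all f = l.all g := by
  induction l with
  | nil => rfl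
  | cons a l ih =>
    simp only [List.all_cons]
    rw [h a (by simp), ih (fun x hx => h x (by simp [hx]))]

-- B as an 'all' over the occurrence counts
theorem pvAlt_eq (word : String) (chars : List (String × Int)) :
    hasAlpha_alt word chars =
      chars.all (fun p => decide (p.2 ≤ pvOcc (PySem.Chars.lower word.toList) p.1.toList)) := by
  unfold hasAlpha_alt
  set w := PySem.Chars.lower word.toList with hw
  set d0 := chars.foldl (fun d p => d.insert p.1 (0 : Int)) PySem.Dict.empty with hd0
  have hnd : d0.keys.Nodup := by
    rw [hd0]
    exact PySem.Dict.nodup_keys_foldl_insert_key chars (fun p => p.1) (fun _ _ => (0 : Int))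
      PySem.Dict.empty PySem.Dict.nodup_keys_empty
  have hmem : ∀ p ∈ chars, p.1 ∈ d0.keys := by
    intro p hp
    rw [hd0, PySem.Dict.keys_foldl_insert_key]
    rw [PySem.Set.mem_update]
    right
    exact List.mem_map_of_mem hp
  have h0 : ∀ x, d0.getD x (0 : Int) = 0 := by
    intro x
    rw [hd0]
    exact pvFromKeys_getD chars PySem.Dict.empty (by intro y; simp) x
  obtain ⟨_, hg⟩ := pvSweep w d0 hnd (w.length + 1)
  apply pv_all_congr_mem
  intro p hp
  rw [hg p.1 (hmem p hp), h0 p.1]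
  unfold pvOcc
  norm_num

-- ===== VERDICT (by name: the statement is the Claim_ definition above) =====
theorem hasAlpha_spec : Claim_unchanged_hasAlpha := by
  intro word chars _
  unfold Spec_hasAlpha
  intro hD
  rw [pvAlt_eq]
  unfold hasAlpha
  rw [pvOuter_eq]
  set w := PySem.Chars.lower word.toList with hw
  unfold D_hasAlpha at hD
  simp only [pvOccW_eq] at hD
  rw [← hw] at hD
  rw [Bool.eq_iff_iff]
  simp only [List.all_eq_true, decide_eq_true_eq]
  constructor
  · intro h p hp
    exact le_trans (le_max_left _ _) (h p hp)
  · intro h p hp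
    have ht := h p hp
    have hnn : 0 ≤ pvOcc w p.1.toList := by unfold pvOcc; positivity
    by_cases h1 : 1 ≤ pvOcc w p.1.toList
    · exact max_le ht h1
    · exfalso
      apply hD
      constructor
      · exact ⟨p, hp, by omega⟩
      · exact h

theorem hasAlpha_changed : Claim_changed_hasAlpha := by
  unfold Claim_changed_hasAlpha; decide

theorem hasAlpha_tight : Claim_exact_hasAlpha := by
  intro word chars _ hD
  unfold D_hasAlpha at hD
  simp only [pvOccW_eq] at hD
  obtain ⟨⟨p, hp, hz⟩, hall⟩ := hD
  rw [pvAlt_eq]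
  unfold hasAlpha
  rw [pvOuter_eq]
  have hA : chars.all (fun p => decide (max p.2 1 ≤ pvOcc (PySem.Chars.lower word.toList) p.1.toList)) = false := by
    rw [List.all_eq_false]
    exact ⟨p, hp, by simp; omega⟩
  have hB : chars.all (fun p => decide (p.2 ≤ pvOcc (PySem.Chars.lower word.toList) p.1.toList)) = true := by
    rw [List.all_eq_true]
    intro q hq
    simpa using hall q hq
  rw [hA, hB]
  simp
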